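-- pv_equiv track=rewrite | github.com/deepintent-ccs/DeepIntent | IconWidgetAnalysis/ContextualTextExtraction/handle_embedded_text.py | prepare_sorted_locations
-- ===== SOURCE A (Python) =====
-- def prepare_sorted_locations(image_locations):
--     """Sort the image locations.
--
--     The order is defined as follows:
--     direct > image button (target > big > small) >
--     animation (first > later) > random (chosen > candidate)
--
--     :param image_locations:
--         List, the found image locations.
--
--     :return:
--         results: List, sorted image locations.
--     """
--     def loc_key(location):
--         location = location[-1][-1]
--         if location == 'direct':
--             return '0'
--         elif location.startswith('btn'):
--             if location.endswith('target'):
--                 return '10'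
--             else:
--                 return '1' + location.split('_')[1]
--         elif location == 'first':
--             return '2'
--         elif location == 'second':
--             return '3'
--         elif location == 'chosen':
--             return '4'
--         elif location == 'candidate':
--             return '5'
--         else:
--             return '6'
--
--     sorted_loc = {}
--     for loc in image_locations:
--         lk = loc_key(loc)
--         if lk not in sorted_loc:
--             sorted_loc[lk] = []
--         sorted_loc[lk].append(loc[-1][0])
--
--     return [item[1] for item in sorted(sorted_loc.items(), key=lambda k: k[0])]
-- ===== SOURCE B (Python) =====
-- def prepare_sorted_locations(image_locations):
--     """Sort the image locations (selection grouping: repeatedly extract the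
--     bucket of the minimal remaining key; no dict, no sort)."""
--     def loc_key(location):
--         s = location[-1][-1]
--         simple = {'direct': '0', 'first': '2', 'second': '3',
--                   'chosen': '4', 'candidate': '5'}
--         if s in simple:
--             return simple[s]
--         if s.startswith('btn'):
--             return '10' if s.endswith('target') else '1' + s.split('_')[1]
--         return '6'
--
--     pairs = [(loc_key(loc), loc[-1][0]) for loc in image_locations]
--     results = []
--     while pairs:
--         k = min(p[0] for p in pairs)
--         results.append([v for key, v in pairs if key == k])
--         pairs = [p for p in pairs if p[0] != k]
--     return results
-- ===== Notes on version B (the rewrite author's own statement) =====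
-- stated objective: alternative
-- what changed: Replaces A's dict-grouping pass plus sort of the dict items by selection grouping: repeatedly find the minimal remaining key, emit its bucket by a filter pass, and drop those pairs (no dict, no sort); loc_key is restated as a table lookup plus the btn branch.
import Mathlib
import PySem

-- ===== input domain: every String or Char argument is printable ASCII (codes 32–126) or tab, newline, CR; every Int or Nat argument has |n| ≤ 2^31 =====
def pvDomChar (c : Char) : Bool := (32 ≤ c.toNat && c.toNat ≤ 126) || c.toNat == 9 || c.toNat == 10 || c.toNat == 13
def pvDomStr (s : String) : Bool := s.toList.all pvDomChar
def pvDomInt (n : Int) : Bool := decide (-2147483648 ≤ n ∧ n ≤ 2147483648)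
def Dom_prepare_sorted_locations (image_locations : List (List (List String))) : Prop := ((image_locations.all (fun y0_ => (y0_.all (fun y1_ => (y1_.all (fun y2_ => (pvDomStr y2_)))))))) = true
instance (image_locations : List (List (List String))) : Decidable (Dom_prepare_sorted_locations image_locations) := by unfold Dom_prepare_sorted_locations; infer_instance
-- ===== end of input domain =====

-- B replaces A's dict-grouping pass + sort of the dict items by selection grouping:
-- repeatedly extract the bucket of the minimal remaining key (no dict, no sort; alternative decomposition, same results).

-- ===== PORT A =====
-- loc_key helper of A, step for step (loc[-1][-1], split('_')[1] are total pyGetD forms, exact under Pre_)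
def locKeyA (location : List (List String)) : String :=
  let s := PySem.List.pyGetD (PySem.List.pyGetD location (-1) []) (-1) ""
  if s == "direct" then "0"
  else if PySem.Str.startswith s "btn" then
    if PySem.Str.endswith s "target" then "10"
    else "1" ++ PySem.List.pyGetD ((PySem.Str.split? s "_").getD []) 1 ""  -- split? is some here: sep "_" ≠ ""
  else if s == "first" then "2"
  else if s == "second" then "3"
  else if s == "chosen" then "4"
  else if s == "candidate" then "5"
  else "6"

-- loc[-1][0], exact under Pre_
def firstA (loc : List (List String)) : String :=
  PySem.List.pyGetD (PySem.List.pyGetD loc (-1) []) 0 ""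

-- loop body: if lk not in sorted_loc: sorted_loc[lk] = [] ; sorted_loc[lk].append(loc[-1][0])
def stepA (d : PySem.Dict String (List String)) (loc : List (List String)) : PySem.Dict String (List String) :=
  let lk := locKeyA loc
  let d := if d.contains lk then d else d.insert lk []
  d.modify lk [] (fun l => l ++ [firstA loc])

def prepare_sorted_locations (image_locations : List (List (List String))) : List (List String) :=
  -- [item[1] for item in sorted(sorted_loc.items(), key=lambda k: k[0])]  (k[0] on the pair is p.1)
  (PySem.List.sorted (image_locations.foldl stepA PySem.Dict.empty).items (fun p => p.1) false).map
    (fun p => p.2)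

-- ===== PORT B =====
-- Source B's loc_key: table lookup for the five literal keys, then the btn branch
def simpleTabB : List (String × String) :=
  [("direct", "0"), ("first", "2"), ("second", "3"), ("chosen", "4"), ("candidate", "5")]

def locKeyB (location : List (List String)) : String :=
  let s := PySem.List.pyGetD (PySem.List.pyGetD location (-1) []) (-1) ""
  -- 's in simple' / 'simple[s]' on the literal dict = first-match lookup in the association list
  match simpleTabB.find? (fun p => p.1 == s) with
  | some p => p.2
  | none =>
    if PySem.Str.startswith s "btn" then
      if PySem.Str.endswith s "target" then "10"
      else "1" ++ PySem.List.pyGetD ((PySem.Str.split? s "_").getD []) 1 ""  -- split? is some: sep "_" ≠ ""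
    else "6"

-- loc[-1][0]
def valB (loc : List (List String)) : String :=
  PySem.List.pyGetD (PySem.List.pyGetD loc (-1) []) 0 ""

-- the while loop: pick the minimal key, emit its bucket, drop it, repeat
def groupMinB (pairs : List (String × String)) : List (List String) :=
  match pairs with
  | [] => []
  | p :: t =>
    let k := (PySem.List.min? ((p :: t).map Prod.fst) (fun x => x)).getD ""
    ((p :: t).filter (fun q => q.1 == k)).map Prod.snd ::
      groupMinB ((p :: t).filter (fun q => !(q.1 == k)))
termination_by pairs.length
decreasing_by
  have hmem : ((PySem.List.min? ((p :: t).map Prod.fst) (fun x => x)).getD "") ∈ (p :: t).map Prod.fst := by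
    cases hmin : PySem.List.min? ((p :: t).map Prod.fst) (fun x => x) with
    | none => exact absurd ((PySem.List.min?_eq_none_iff _ _).1 hmin) (by simp)
    | some m => simpa using PySem.List.min?_mem hmin
  rcases List.mem_map.1 hmem with ⟨q, hq, hq1⟩
  rw [← List.countP_eq_length_filter]
  exact List.countP_lt_length_iff.2 ⟨q, hq, by simp [hq1]⟩

def prepare_sorted_locations_alt (image_locations : List (List (List String))) : List (List String) :=
  groupMinB (image_locations.map (fun loc => (locKeyB loc, valB loc)))

-- ===== PRECONDITION & SPEC =====
-- Pre_ excludes exactly the inputs where Python A raises IndexError: an empty location list,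
-- an empty last sublist, or a last string starting with 'btn', not ending in 'target' and
-- containing no '_' (then location.split('_')[1] raises).
def preLoc (loc : List (List String)) : Bool :=
  match loc.getLast? with
  | none => false
  | some l =>
    match l.getLast? with
    | none => false
    | some s =>
      !(PySem.Str.startswith s "btn") || PySem.Str.endswith s "target" || PySem.Str.isIn "_" s

def Pre_prepare_sorted_locations (image_locations : List (List (List String))) : Prop :=
  image_locations.all preLoc = true
instance (image_locations : List (List (List String))) : Decidable (Pre_prepare_sorted_locations image_locations) := by unfold Pre_prepare_sorted_locations; infer_instance

def pvWitness_prepare_sorted_locations : List (List (List String)) :=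
  [[["a", "direct"]], [["b", "btn_big"]], [["c", "first"]], [["d", "direct"]]]

def Spec_prepare_sorted_locations (image_locations : List (List (List String))) (out : List (List String)) : Prop := out = prepare_sorted_locations_alt image_locations
instance (image_locations : List (List (List String))) (out : List (List String)) : Decidable (Spec_prepare_sorted_locations image_locations out) := by unfold Spec_prepare_sorted_locations; infer_instance

-- ===== CLAIM (what is proved, stated in full; the proofs are below) =====
def Claim_equal_prepare_sorted_locations : Prop := ∀ (image_locations : List (List (List String))), Dom_prepare_sorted_locations image_locations → Pre_prepare_sorted_locations image_locations → Spec_prepare_sorted_locations image_locations (prepare_sorted_locations image_locations)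

-- ===== LEMMAS AND PROOFS =====

theorem locKeyB_eq : locKeyB = locKeyA := by
  funext loc
  unfold locKeyB locKeyA simpleTabB
  simp only [List.find?]
  generalize PySem.List.pyGetD (PySem.List.pyGetD loc (-1) []) (-1) "" = s
  by_cases h0 : s = "direct"
  · subst h0; decide
  by_cases h1 : s = "first"
  · subst h1; decide
  by_cases h2 : s = "second"
  · subst h2; decide
  by_cases h3 : s = "chosen"
  · subst h3; decide
  by_cases h4 : s = "candidate"
  · subst h4; decide
  · have e0 : ("direct" == s) = false := by rw [beq_eq_false_iff_ne]; exact fun h => h0 h.symm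
    have e1 : ("first" == s) = false := by rw [beq_eq_false_iff_ne]; exact fun h => h1 h.symm
    have e2 : ("second" == s) = false := by rw [beq_eq_false_iff_ne]; exact fun h => h2 h.symm
    have e3 : ("chosen" == s) = false := by rw [beq_eq_false_iff_ne]; exact fun h => h3 h.symm
    have e4 : ("candidate" == s) = false := by rw [beq_eq_false_iff_ne]; exact fun h => h4 h.symm
    have f0 : (s == "direct") = false := by rw [beq_eq_false_iff_ne]; exact h0
    have f1 : (s == "first") = false := by rw [beq_eq_false_iff_ne]; exact h1
    have f2 : (s == "second") = false := by rw [beq_eq_false_iff_ne]; exact h2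
    have f3 : (s == "chosen") = false := by rw [beq_eq_false_iff_ne]; exact h3
    have f4 : (s == "candidate") = false := by rw [beq_eq_false_iff_ne]; exact h4
    rw [e0, e1, e2, e3, e4, f0, f1, f2, f3, f4]
    simp

theorem valB_eq : valB = firstA := rfl

-- value of one loop step at any key
theorem getD_stepA (d : PySem.Dict String (List String)) (loc : List (List String)) (c : String) :
    (stepA d loc).getD c [] = d.getD c [] ++ (if locKeyA loc == c then [firstA loc] else []) := by
  unfold stepA
  by_cases hc : d.contains (locKeyA loc)
  · simp only [hc, if_true, PySem.Dict.getD_modify]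
    by_cases h : c = locKeyA loc
    · simp [h]
    · simp [h, Ne.symm h, beq_iff_eq]
  · simp only [hc, if_false, Bool.false_eq_true, PySem.Dict.getD_modify, PySem.Dict.getD_insert]
    by_cases h : c = locKeyA loc
    · subst h
      rw [PySem.Dict.getD_of_not_contains]
      · simp
      · simpa using hc
    · simp [h, Ne.symm h, beq_iff_eq]

-- loop invariant: the bucket at key c is the filtered, mapped input
theorem getD_foldl_stepA (xs : List (List (List String))) (d : PySem.Dict String (List String)) (c : String) :
    (xs.foldl stepA d).getD c [] = d.getD c [] ++ (xs.filter (fun loc => locKeyA loc == c)).map firstA := by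
  induction xs generalizing d with
  | nil => simp
  | cons x t ih =>
    simp only [List.foldl_cons, ih, getD_stepA, List.filter_cons]
    by_cases h : locKeyA x == c
    · simp [h, List.append_assoc]
    · simp [h]

-- keys of the loop result: first occurrences of the mapped keys
theorem keys_stepA (d : PySem.Dict String (List String)) (x : List (List String)) :
    (stepA d x).keys = PySem.Set.add d.keys (locKeyA x) := by
  unfold stepA
  by_cases hc : d.contains (locKeyA x)
  · rw [PySem.Set.add_of_mem ((PySem.Dict.contains_iff_mem_keys d _).1 hc)]
    simp only [hc, if_true, PySem.Dict.keys_modify]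
    exact PySem.Dict.keys_insert_of_contains d _ hc
  · have hm : locKeyA x ∉ d.keys := fun hmem => hc ((PySem.Dict.contains_iff_mem_keys d _).2 hmem)
    rw [PySem.Set.add_of_not_mem hm]
    simp only [hc, if_false, Bool.false_eq_true, PySem.Dict.keys_modify]
    rw [PySem.Dict.keys_insert_of_contains _ _ (PySem.Dict.contains_insert_self d _ _)]
    rw [PySem.Dict.keys_insert_of_not_contains]
    simpa using hc

theorem keys_foldl_stepA (xs : List (List (List String))) (d : PySem.Dict String (List String)) :
    (xs.foldl stepA d).keys = PySem.Set.update d.keys (xs.map locKeyA) := by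
  induction xs generalizing d with
  | nil => simp [PySem.Set.update]
  | cons x t ih =>
    rw [List.map_cons, PySem.Set.update_cons, List.foldl_cons, ih, keys_stepA]

theorem nodup_keys_foldl_stepA (xs : List (List (List String))) :
    (xs.foldl stepA PySem.Dict.empty).keys.Nodup := by
  rw [keys_foldl_stepA]
  exact PySem.Set.nodup_update _ _ (by simp)

-- A's result, characterised: sorted distinct keys, each mapped to its filtered bucket
theorem prepareA_char (xs : List (List (List String))) :
    prepare_sorted_locations xs
      = (PySem.List.sorted (PySem.Set.ofList (xs.map locKeyA)) (fun x => x) false).map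
          (fun c => (xs.filter (fun loc => locKeyA loc == c)).map firstA) := by
  unfold prepare_sorted_locations
  generalize hd : xs.foldl stepA PySem.Dict.empty = d
  have hnd : d.keys.Nodup := hd ▸ nodup_keys_foldl_stepA xs
  have hkeys : d.keys = PySem.Set.ofList (xs.map locKeyA) := by
    rw [← hd, keys_foldl_stepA]
    simp [PySem.Set.ofList, PySem.Set.update]
  have hitems : d.items = d.keys.map (fun c => (c, d.getD c [])) :=
    PySem.Dict.items_eq_map_keys d hnd []
  have hsorted : PySem.List.sorted d.items (fun p => p.1) false
      = (PySem.List.sorted d.keys (fun x => x) false).map (fun c => (c, d.getD c [])) := by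
    apply PySem.List.sorted_eq_of_perm_of_pairwise_lt
    · rw [hitems]
      exact (PySem.List.sorted_perm d.keys (fun x => x) false).map _
    · have hpl : (PySem.List.sorted d.keys (fun x => x) false).Pairwise (· < ·) := by
        rw [hkeys]; exact PySem.List.sorted_ofList_pairwise_lt _
      exact hpl.map _ (fun a b h => h)
  rw [hsorted, hkeys, List.map_map]
  apply List.map_congr_left
  intro c _
  simp only [Function.comp]
  rw [← hd, getD_foldl_stepA]
  simp

-- B's loop, characterised the same way (selection grouping = sorted distinct keys + filters)
theorem groupMinB_char_aux (n : Nat) : ∀ ps : List (String × String), ps.length ≤ n →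
    groupMinB ps
      = (PySem.List.sorted (PySem.Set.ofList (ps.map Prod.fst)) (fun x => x) false).map
          (fun c => (ps.filter (fun q => q.1 == c)).map Prod.snd) := by
  induction n with
  | zero =>
    intro ps hle
    have : ps = [] := List.length_eq_zero_iff.1 (Nat.le_zero.1 hle)
    subst this
    simp [groupMinB, PySem.Set.ofList]
  | succ n ih =>
    intro ps hle
    match ps with
    | [] => simp [groupMinB, PySem.Set.ofList]
    | p :: t =>
      obtain ⟨m, hmin⟩ : ∃ m, PySem.List.min? ((p :: t).map Prod.fst) (fun x => x) = some m := by
        cases hmin : PySem.List.min? ((p :: t).map Prod.fst) (fun x => x) with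
        | none => exact absurd ((PySem.List.min?_eq_none_iff _ _).1 hmin) (by simp)
        | some m => exact ⟨m, rfl⟩
      have hmem : m ∈ (p :: t).map Prod.fst := PySem.List.min?_mem hmin
      have hmle : ∀ y ∈ (p :: t).map Prod.fst, m ≤ y := by
        intro y hy; exact PySem.List.min?_isMin hmin y hy
      -- the sorted distinct keys, with their head identified
      have hSperm : (PySem.List.sorted (PySem.Set.ofList ((p :: t).map Prod.fst)) (fun x => x) false).Perm
          (PySem.Set.ofList ((p :: t).map Prod.fst)) := PySem.List.sorted_perm _ _ _
      have hSpl : (PySem.List.sorted (PySem.Set.ofList ((p :: t).map Prod.fst)) (fun x => x) false).Pairwise (· < ·) :=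
        PySem.List.sorted_ofList_pairwise_lt _
      have hmemS : m ∈ PySem.List.sorted (PySem.Set.ofList ((p :: t).map Prod.fst)) (fun x => x) false :=
        hSperm.mem_iff.2 ((PySem.Set.mem_ofList _ _).2 hmem)
      match hS : PySem.List.sorted (PySem.Set.ofList ((p :: t).map Prod.fst)) (fun x => x) false with
      | [] => rw [hS] at hmemS; cases hmemS
      | h :: tl =>
        rw [hS] at hSperm hSpl hmemS
        have hhl : h ∈ (p :: t).map Prod.fst :=
          (PySem.Set.mem_ofList _ _).1 (hSperm.mem_iff.1 (List.mem_cons_self))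
        have hlt : ∀ x ∈ tl, h < x := fun x hx => (List.pairwise_cons.1 hSpl).1 x hx
        have hm_eq : m = h := by
          rcases List.mem_cons.1 hmemS with hmh | hmtl
          · exact hmh
          · exact absurd (hmle h hhl) (not_le.2 (hlt m hmtl))
        subst hm_eq
        -- tail of the sorted keys = sorted distinct keys of the rest
        have htl_nodup : tl.Nodup := ((List.pairwise_cons.1 hSpl).2).imp ne_of_lt
        have htl_mem : ∀ x, x ∈ tl ↔ x ∈ PySem.Set.ofList
            ((((p :: t).filter (fun q => !(q.1 == m))).map Prod.fst)) := by
          intro x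
          rw [PySem.Set.mem_ofList]
          constructor
          · intro hx
            have hxS : x ∈ (p :: t).map Prod.fst :=
              (PySem.Set.mem_ofList _ _).1 (hSperm.mem_iff.1 (List.mem_cons_of_mem _ hx))
            rcases List.mem_map.1 hxS with ⟨q, hq, hq1⟩
            refine List.mem_map.2 ⟨q, List.mem_filter.2 ⟨hq, ?_⟩, hq1⟩
            have hqm : q.1 ≠ m := by rw [hq1]; exact ne_of_gt (hlt x hx)
            simpa using hqm
          · intro hx
            rcases List.mem_map.1 hx with ⟨q, hq, hq1⟩
            rcases List.mem_filter.1 hq with ⟨hq', hne⟩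
            have hxne : x ≠ m := by
              rw [← hq1]; intro h'; rw [h'] at hne; simp at hne
            have hxS : x ∈ m :: tl := by
              rw [← hS, PySem.List.mem_sorted, PySem.Set.mem_ofList]
              exact List.mem_map.2 ⟨q, hq', hq1⟩
            rcases List.mem_cons.1 hxS with hxh | hxtl
            · exact absurd hxh hxne
            · exact hxtl
        have htl_perm : tl.Perm (PySem.Set.ofList
            ((((p :: t).filter (fun q => !(q.1 == m))).map Prod.fst))) :=
          (List.perm_ext_iff_of_nodup htl_nodup (PySem.Set.nodup_ofList _)).2 htl_mem
        have htl_eq : PySem.List.sorted (PySem.Set.ofList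
            ((((p :: t).filter (fun q => !(q.1 == m))).map Prod.fst))) (fun x => x) false = tl :=
          PySem.List.sorted_id_eq_of_perm_of_pairwise _ _ htl_perm
            (((List.pairwise_cons.1 hSpl).2).imp le_of_lt)
        -- one unfolding of the loop, then the induction hypothesis on the rest
        have hrest : ((p :: t).filter (fun q => !(q.1 == m))).length ≤ n := by
          have hlt' : ((p :: t).filter (fun q => !(q.1 == m))).length < (p :: t).length := by
            rcases List.mem_map.1 hmem with ⟨q, hq, hq1⟩
            rw [← List.countP_eq_length_filter]
            exact List.countP_lt_length_iff.2 ⟨q, hq, by simp [hq1]⟩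
          simp only [List.length_cons] at hlt' hle
          omega
        rw [groupMinB, hmin]
        simp only [Option.getD_some, List.map_cons]
        refine congrArg₂ _ rfl ?_
        rw [ih _ hrest, htl_eq]
        apply List.map_congr_left
        intro c hc
        have hcne : c ≠ m := ne_of_gt (hlt c hc)
        rw [List.filter_filter]
        refine congrArg _ (List.filter_congr ?_)
        intro q _
        by_cases hqc : q.1 = c
        · simp only [hqc]
          simp [hcne]
        · simp [hqc]

theorem groupMinB_char (ps : List (String × String)) :
    groupMinB ps
      = (PySem.List.sorted (PySem.Set.ofList (ps.map Prod.fst)) (fun x => x) false).map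
          (fun c => (ps.filter (fun q => q.1 == c)).map Prod.snd) :=
  groupMinB_char_aux ps.length ps (Nat.le_refl _)

theorem prepare_sorted_locations_spec : Claim_equal_prepare_sorted_locations := by
  intro xs _ _
  unfold Spec_prepare_sorted_locations prepare_sorted_locations_alt
  rw [prepareA_char, groupMinB_char, locKeyB_eq, valB_eq]
  rw [List.map_map]
  simp only [Function.comp_def]
  apply List.map_congr_left
  intro c _
  rw [List.filter_map, List.map_map]
  rfl

-- ===== VERDICT (by name: the statement is the Claim_ definition above) =====
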